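-- pv_equiv track=rewrite | github.com/Sonnet-Discord/sonnet-modules | mod/ultrabear/faq/cmd_faq.py | stripargs
-- ===== SOURCE A (Python) =====
-- from typing import Any, Union, List, Tuple, Type, Final, Optional, cast  # pytype: disable=import-error
--
-- def stripargs(content: str, argc: int) -> str:
--     """
--     Strips space seperated arguments out of a string
--     """
--
--     out: List[str] = []
--
--     for idx, val in enumerate(content.split(" ")):
--         if idx >= argc:
--             # If index is greater than args count then add to output
--             out.append(val)
--         elif not val:
--             # If value is blank increase args count to compensate empty argument
--             argc += 1
--
--     return " ".join(out)
-- ===== SOURCE B (Python) =====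
-- def stripargs(content: str, argc: int) -> str:
--     """
--     Strips space seperated arguments out of a string
--     """
--     tokens = content.split(" ")
--     i = 0
--     remaining = argc
--     while i < len(tokens) and remaining > 0:
--         if tokens[i]:
--             remaining -= 1
--         i += 1
--     return " ".join(tokens[i:])
-- ===== Notes on version B (the rewrite author's own statement) =====
-- stated objective: simpler
-- what changed: Instead of A's enumerate loop that appends kept tokens one by one while bumping argc on blanks, B first scans to find the skip boundary (decrementing a counter only on non-empty tokens) and then joins the slice of the remaining tokens.
import Mathlib
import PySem

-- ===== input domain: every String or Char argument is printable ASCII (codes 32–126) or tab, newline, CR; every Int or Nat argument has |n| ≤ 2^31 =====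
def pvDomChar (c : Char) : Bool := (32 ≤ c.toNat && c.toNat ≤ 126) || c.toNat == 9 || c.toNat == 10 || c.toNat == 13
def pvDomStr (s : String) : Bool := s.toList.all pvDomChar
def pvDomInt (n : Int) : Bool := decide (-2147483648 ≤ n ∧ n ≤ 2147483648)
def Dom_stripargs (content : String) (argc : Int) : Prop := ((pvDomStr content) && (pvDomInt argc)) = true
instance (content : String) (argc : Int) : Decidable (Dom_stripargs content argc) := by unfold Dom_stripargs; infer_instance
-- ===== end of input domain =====

-- B computes the skip boundary first, then joins the tail slice, instead of A's append-while-bumping-argc loop (objective: simpler).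

-- ===== PORT A =====
def stripargs (content : String) (argc : Int) : String :=
  PySem.Str.join " "
    ((PySem.List.enumerate ((PySem.Str.split? content " ").getD []) 0).foldl
      (fun (s : List String × Int) p =>
        if p.1 ≥ s.2 then (s.1 ++ [p.2], s.2)
        else if p.2 = "" then (s.1, s.2 + 1) else s)
      ([], argc)).1

-- ===== PORT B =====
-- the while loop advancing index i over tokens, ported as structural consumption of the token list;
-- tokens[i:] is the unconsumed remainder
def stripSkip : List String → Int → List String
  | [], _ => []
  | t :: ts, r => if r > 0 then stripSkip ts (if t = "" then r else r - 1) else t :: ts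

def stripargs_alt (content : String) (argc : Int) : String :=
  PySem.Str.join " " (stripSkip ((PySem.Str.split? content " ").getD []) argc)

-- ===== PRECONDITION & SPEC =====
def Spec_stripargs (content : String) (argc : Int) (out : String) : Prop := out = stripargs_alt content argc
instance (content : String) (argc : Int) (out : String) : Decidable (Spec_stripargs content argc out) := by unfold Spec_stripargs; infer_instance

-- ===== CLAIM (what is proved, stated in full; the proofs are below) =====
def Claim_equal_stripargs : Prop := ∀ (content : String) (argc : Int), Dom_stripargs content argc → Spec_stripargs content argc (stripargs content argc)

-- ===== LEMMAS AND PROOFS =====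

theorem stripSkip_nonpos (ts : List String) (r : Int) (h : ¬ r > 0) : stripSkip ts r = ts := by
  cases ts <;> simp [stripSkip, h]

theorem stripargs_loop (ts : List String) : ∀ (n : Int) (out : List String) (a : Int),
    ((PySem.List.enumerate ts n).foldl
      (fun (s : List String × Int) p =>
        if p.1 ≥ s.2 then (s.1 ++ [p.2], s.2)
        else if p.2 = "" then (s.1, s.2 + 1) else s)
      (out, a)).1 = out ++ stripSkip ts (a - n) := by
  induction ts with
  | nil => intro n out a; simp [PySem.List.enumerate_nil, stripSkip]
  | cons t ts ih =>
    intro n out a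
    rw [PySem.List.enumerate_cons]
    by_cases h : n ≥ a
    · have hr : ¬ (a - n > 0) := by omega
      have hr' : ¬ (a - (n + 1) > 0) := by omega
      simp only [List.foldl_cons, if_pos h, ih (n + 1) (out ++ [t]) a,
        stripSkip_nonpos ts _ hr', stripSkip, if_neg hr]
      simp
    · have hr : a - n > 0 := by omega
      by_cases ht : t = ""
      · simp only [List.foldl_cons, if_neg h, if_pos ht, ih (n + 1) out (a + 1),
          stripSkip, if_pos hr]
        congr 2
        omega
      · simp only [List.foldl_cons, if_neg h, if_neg ht, ih (n + 1) out a,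
          stripSkip, if_pos hr]
        congr 2
        omega

-- ===== VERDICT (by name: the statement is the Claim_ definition above) =====
theorem stripargs_spec : Claim_equal_stripargs := by
  intro content argc _
  unfold Spec_stripargs stripargs stripargs_alt
  rw [stripargs_loop ((PySem.Str.split? content " ").getD []) 0 [] argc]
  simp
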